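-- pv_equiv track=rewrite | github.com/AJEY1003/Mosip-decode-IIT | ocr-mosip-integration/src/core/itr_analyzer.py | _extract_personal_info
-- ===== SOURCE A (Python) =====
-- from typing import Dict, List, Tuple
--
-- def _extract_personal_info(documents: Dict) -> Dict:
--     """Extract consolidated personal information"""
--     personal_info = {
--         'name': None,
--         'pan': None,
--         'aadhaar': None,
--         'date_of_birth': None,
--         'address': None,
--         'phone': None,
--         'email': None
--     }
--
--     # Priority order for data sources
--     priority_order = ['aadhaar', 'pan_card', 'form16', 'bank_statement']
--
--     for doc_type in priority_order:
--         if doc_type in documents: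
--             doc_data = documents[doc_type].get('structured_data', {})
--
--             # Extract with priority
--             if not personal_info['name'] and doc_data.get('name'):
--                 personal_info['name'] = doc_data['name']
--             if not personal_info['pan'] and doc_data.get('pan_number'):
--                 personal_info['pan'] = doc_data['pan_number']
--             if not personal_info['aadhaar'] and doc_data.get('aadhaar_number'):
--                 personal_info['aadhaar'] = doc_data['aadhaar_number']
--             if not personal_info['date_of_birth'] and doc_data.get('date_of_birth'):
--                 personal_info['date_of_birth'] = doc_data['date_of_birth']
--             if not personal_info['address'] and doc_data.get('address'):
--                 personal_info['address'] = doc_data['address']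
--             if not personal_info['phone'] and doc_data.get('phone'):
--                 personal_info['phone'] = doc_data['phone']
--             if not personal_info['email'] and doc_data.get('email'):
--                 personal_info['email'] = doc_data['email']
--
--     return personal_info
-- ===== SOURCE B (Python) =====
-- def _extract_personal_info(documents):
--     """Extract consolidated personal information (field-major scan with early exit)"""
--     FIELDS = [
--         ('name', 'name'),
--         ('pan', 'pan_number'),
--         ('aadhaar', 'aadhaar_number'),
--         ('date_of_birth', 'date_of_birth'),
--         ('address', 'address'),
--         ('phone', 'phone'),
--         ('email', 'email'),
--     ]
--     PRIORITY = ['aadhaar', 'pan_card', 'form16', 'bank_statement']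
--
--     def first_value(src_key):
--         for doc_type in PRIORITY:
--             if doc_type in documents:
--                 value = documents[doc_type].get('structured_data', {}).get(src_key)
--                 if value:
--                     return value
--         return None
--
--     return {out_key: first_value(src_key) for out_key, src_key in FIELDS}
-- ===== Notes on version B (the rewrite author's own statement) =====
-- stated objective: simpler
-- what changed: Replaces A's document-major fold over a 7-slot mutable record with seven repeated not-yet-set guards by a field-major scan: a field table plus a first_value helper that walks the priority list once per field and returns at the first truthy hit.
import Mathlib
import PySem

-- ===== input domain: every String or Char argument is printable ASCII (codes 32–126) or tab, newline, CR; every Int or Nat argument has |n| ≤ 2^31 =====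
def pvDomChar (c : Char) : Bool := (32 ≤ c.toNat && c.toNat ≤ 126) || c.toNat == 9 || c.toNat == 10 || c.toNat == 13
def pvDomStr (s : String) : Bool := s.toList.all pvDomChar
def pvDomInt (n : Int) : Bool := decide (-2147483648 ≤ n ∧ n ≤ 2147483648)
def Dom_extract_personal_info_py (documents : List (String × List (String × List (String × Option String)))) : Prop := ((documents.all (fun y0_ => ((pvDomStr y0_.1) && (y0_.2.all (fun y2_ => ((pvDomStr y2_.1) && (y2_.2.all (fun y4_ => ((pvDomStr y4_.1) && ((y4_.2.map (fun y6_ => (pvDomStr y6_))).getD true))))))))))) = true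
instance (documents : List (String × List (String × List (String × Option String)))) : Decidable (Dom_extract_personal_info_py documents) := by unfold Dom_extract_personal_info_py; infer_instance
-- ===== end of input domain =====

-- B replaces A's document-major fold over a 7-field record (with not-yet-set guards)
-- by a field-major first-truthy scan per field; objective: simpler.


-- ===== PORT A =====

-- Python truthiness of a personal_info slot (None or a string)
def pvTruthy (o : Option String) : Bool :=
  match o with
  | none => false
  | some s => !(s == "")

-- Python truthiness of doc_data.get(k) where stored values are Optional[str]
def pvTruthyGet (o : Option (Option String)) : Bool :=
  match o with
  | some (some s) => !(s == "")
  | _ => false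

-- one guarded update: `if not personal_info[f] and doc_data.get(k): personal_info[f] = doc_data[k]`
-- (doc_data[k] is read with getD; the guard guarantees the key is present, so this is exact)
def pvUpd (cur : Option String) (dd : PySem.Dict String (Option String)) (k : String) :
    Option String :=
  if !pvTruthy cur && pvTruthyGet (dd.get? k) then dd.getD k none else cur

-- the 7-slot state: (name, pan, aadhaar, date_of_birth, address, phone, email)
def pvState := Option String × Option String × Option String × Option String ×
               Option String × Option String × Option String

def pvStepA (documents : PySem.Dict String (List (String × List (String × Option String))))
    (pi : pvState) (doc_type : String) : pvState :=
  match documents.get? doc_type with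
  | none => pi
  | some doc =>
      let dd := PySem.Dict.mk ((PySem.Dict.mk doc).getD "structured_data" [])
      (pvUpd pi.1 dd "name",
       pvUpd pi.2.1 dd "pan_number",
       pvUpd pi.2.2.1 dd "aadhaar_number",
       pvUpd pi.2.2.2.1 dd "date_of_birth",
       pvUpd pi.2.2.2.2.1 dd "address",
       pvUpd pi.2.2.2.2.2.1 dd "phone",
       pvUpd pi.2.2.2.2.2.2 dd "email")

-- fin = the state after the document-major loop
def pvFinal (documents : List (String × List (String × List (String × Option String)))) :
    pvState :=
  ["aadhaar", "pan_card", "form16", "bank_statement"].foldl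
    (pvStepA (PySem.Dict.mk documents))
    ((none, none, none, none, none, none, none) : pvState)

def extract_personal_info_py
    (documents : List (String × List (String × List (String × Option String)))) :
    List (String × Option String) :=
  [("name", (pvFinal documents).1), ("pan", (pvFinal documents).2.1),
   ("aadhaar", (pvFinal documents).2.2.1), ("date_of_birth", (pvFinal documents).2.2.2.1),
   ("address", (pvFinal documents).2.2.2.2.1), ("phone", (pvFinal documents).2.2.2.2.2.1),
   ("email", (pvFinal documents).2.2.2.2.2.2)]

-- ===== PORT B =====

-- first_value: walk the priority list, return the first truthy doc_data.get(src_key)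
def pvFirstValue (documents : PySem.Dict String (List (String × List (String × Option String))))
    : List String → String → Option String
  | [], _ => none
  | doc_type :: rest, src_key =>
      match documents.get? doc_type with
      | none => pvFirstValue documents rest src_key
      | some doc =>
          let dd := PySem.Dict.mk ((PySem.Dict.mk doc).getD "structured_data" [])
          match dd.get? src_key with
          | some (some s) =>
              if !(s == "") then some s else pvFirstValue documents rest src_key
          | _ => pvFirstValue documents rest src_key

def pvFields : List (String × String) :=
  [("name", "name"), ("pan", "pan_number"), ("aadhaar", "aadhaar_number"),
   ("date_of_birth", "date_of_birth"), ("address", "address"),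
   ("phone", "phone"), ("email", "email")]

def extract_personal_info_py_alt
    (documents : List (String × List (String × List (String × Option String)))) :
    List (String × Option String) :=
  pvFields.map (fun p =>
    (p.1, pvFirstValue (PySem.Dict.mk documents)
      ["aadhaar", "pan_card", "form16", "bank_statement"] p.2))

-- ===== PRECONDITION & SPEC =====
def Spec_extract_personal_info_py (documents : List (String × List (String × List (String × Option String)))) (out : List (String × Option String)) : Prop := out = extract_personal_info_py_alt documents
instance (documents : List (String × List (String × List (String × Option String)))) (out : List (String × Option String)) : Decidable (Spec_extract_personal_info_py documents out) := by unfold Spec_extract_personal_info_py; infer_instance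

-- ===== CLAIM (what is proved, stated in full; the proofs are below) =====
def Claim_equal_extract_personal_info_py : Prop := ∀ (documents : List (String × List (String × List (String × Option String)))), Dom_extract_personal_info_py documents → Spec_extract_personal_info_py documents (extract_personal_info_py documents)

-- ===== LEMMAS AND PROOFS =====

-- per-field fold corresponding to one slot of A's state
def pvFold1 (documents : PySem.Dict String (List (String × List (String × Option String))))
    (k : String) (cur : Option String) : List String → Option String
  | [] => cur
  | dt :: rest =>
      pvFold1 documents k
        (match documents.get? dt with
         | none => cur
         | some doc =>
             pvUpd cur (PySem.Dict.mk ((PySem.Dict.mk doc).getD "structured_data" [])) k) rest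

-- unfolding pvFold1 one document at a time
theorem pvFold1_cons_none
    {documents : PySem.Dict String (List (String × List (String × Option String)))}
    {dt : String} (k : String) (cur : Option String) (rest : List String)
    (hg : documents.get? dt = none) :
    pvFold1 documents k cur (dt :: rest) = pvFold1 documents k cur rest := by
  rw [pvFold1, hg]

theorem pvFold1_cons_some
    {documents : PySem.Dict String (List (String × List (String × Option String)))}
    {dt : String} {doc : List (String × List (String × Option String))}
    (k : String) (cur : Option String) (rest : List String)
    (hg : documents.get? dt = some doc) :
    pvFold1 documents k cur (dt :: rest) =
      pvFold1 documents k
        (pvUpd cur (PySem.Dict.mk ((PySem.Dict.mk doc).getD "structured_data" [])) k) rest := by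
  rw [pvFold1, hg]

-- A's tuple fold decomposes into seven independent per-field folds
theorem pvFold_components
    (documents : PySem.Dict String (List (String × List (String × Option String))))
    (l : List String) (pi : pvState) :
    l.foldl (pvStepA documents) pi =
      (pvFold1 documents "name" pi.1 l,
       pvFold1 documents "pan_number" pi.2.1 l,
       pvFold1 documents "aadhaar_number" pi.2.2.1 l,
       pvFold1 documents "date_of_birth" pi.2.2.2.1 l,
       pvFold1 documents "address" pi.2.2.2.2.1 l,
       pvFold1 documents "phone" pi.2.2.2.2.2.1 l,
       pvFold1 documents "email" pi.2.2.2.2.2.2 l) := by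
  induction l generalizing pi with
  | nil => rfl
  | cons dt rest ih =>
      rw [List.foldl_cons]
      cases hg : documents.get? dt with
      | none =>
          have h1 : pvStepA documents pi dt = pi := by unfold pvStepA; rw [hg]
          rw [h1, ih]
          simp only [pvFold1_cons_none _ _ _ hg]
      | some doc =>
          have h1 : pvStepA documents pi dt =
              (pvUpd pi.1 (PySem.Dict.mk ((PySem.Dict.mk doc).getD "structured_data" [])) "name",
               pvUpd pi.2.1 (PySem.Dict.mk ((PySem.Dict.mk doc).getD "structured_data" [])) "pan_number",
               pvUpd pi.2.2.1 (PySem.Dict.mk ((PySem.Dict.mk doc).getD "structured_data" [])) "aadhaar_number",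
               pvUpd pi.2.2.2.1 (PySem.Dict.mk ((PySem.Dict.mk doc).getD "structured_data" [])) "date_of_birth",
               pvUpd pi.2.2.2.2.1 (PySem.Dict.mk ((PySem.Dict.mk doc).getD "structured_data" [])) "address",
               pvUpd pi.2.2.2.2.2.1 (PySem.Dict.mk ((PySem.Dict.mk doc).getD "structured_data" [])) "phone",
               pvUpd pi.2.2.2.2.2.2 (PySem.Dict.mk ((PySem.Dict.mk doc).getD "structured_data" [])) "email") := by
            unfold pvStepA; rw [hg]
          rw [h1, ih]
          simp only [pvFold1_cons_some _ _ _ hg]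

-- pvFirstValue, one document at a time
theorem pvFirstValue_cons_none
    {documents : PySem.Dict String (List (String × List (String × Option String)))}
    {dt : String} (rest : List String) (k : String)
    (hg : documents.get? dt = none) :
    pvFirstValue documents (dt :: rest) k = pvFirstValue documents rest k := by
  rw [pvFirstValue, hg]

theorem pvFirstValue_cons_some
    {documents : PySem.Dict String (List (String × List (String × Option String)))}
    {dt : String} {doc : List (String × List (String × Option String))}
    (rest : List String) (k : String)
    (hg : documents.get? dt = some doc) :
    pvFirstValue documents (dt :: rest) k =
      (match (PySem.Dict.mk ((PySem.Dict.mk doc).getD "structured_data" [])).get? k with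
       | some (some s) =>
           if !(s == "") then some s else pvFirstValue documents rest k
       | _ => pvFirstValue documents rest k) := by
  rw [pvFirstValue, hg]

-- a truthy value, once set, is final; from an unset slot the fold is the first truthy hit
theorem pvFold1_eq_firstValue
    (documents : PySem.Dict String (List (String × List (String × Option String))))
    (k : String) (cur : Option String) (l : List String)
    (h : cur = none ∨ pvTruthy cur = true) :
    pvFold1 documents k cur l =
      if pvTruthy cur then cur else pvFirstValue documents l k := by
  induction l generalizing cur with
  | nil =>
      rcases h with h | h
      · simp [pvFold1, pvFirstValue, h, pvTruthy]
      · simp [pvFold1, h]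
  | cons dt rest ih =>
      cases hg : documents.get? dt with
      | none =>
          rw [pvFold1_cons_none _ _ _ hg, pvFirstValue_cons_none _ _ hg]
          exact ih cur h
      | some doc =>
          rw [pvFold1_cons_some _ _ _ hg, pvFirstValue_cons_some _ _ hg]
          rcases h with h | h
          · subst h
            cases hdd : (PySem.Dict.mk ((PySem.Dict.mk doc).getD "structured_data" [])).get? k with
            | none =>
                rw [show pvUpd none _ k = none by simp [pvUpd, pvTruthyGet, hdd]]
                rw [ih none (Or.inl rfl)]
            | some v =>
                cases v with
                | none =>
                    rw [show pvUpd none _ k = none by simp [pvUpd, pvTruthyGet, hdd]]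
                    rw [ih none (Or.inl rfl)]
                | some s =>
                    by_cases hs : s = ""
                    · subst hs
                      rw [show pvUpd none _ k = none by simp [pvUpd, pvTruthyGet, hdd]]
                      rw [ih none (Or.inl rfl)]
                      simp
                    · have hget : PySem.Dict.getD
                          (PySem.Dict.mk ((PySem.Dict.mk doc).getD "structured_data" [])) k none
                          = some s := by
                        rw [PySem.Dict.getD_eq_get?_getD, hdd]; rfl
                      rw [show pvUpd none _ k = some s by
                        simp [pvUpd, pvTruthyGet, hdd, hget, pvTruthy, hs]]
                      rw [ih (some s) (Or.inr (by simp [pvTruthy, hs]))]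
                      simp [pvTruthy, hs]
          · rw [show pvUpd cur _ k = cur by simp [pvUpd, h]]
            rw [ih cur (Or.inr h)]
            cases hdd : (PySem.Dict.mk ((PySem.Dict.mk doc).getD "structured_data" [])).get? k <;>
              simp [h]

-- ===== VERDICT (by name: the statement is the Claim_ definition above) =====
theorem extract_personal_info_py_spec : Claim_equal_extract_personal_info_py := by
  intro documents _
  unfold Spec_extract_personal_info_py extract_personal_info_py extract_personal_info_py_alt
    pvFinal pvFields
  rw [pvFold_components]
  simp only [pvFold1_eq_firstValue _ _ none _ (Or.inl rfl), pvTruthy, List.map_cons,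
    List.map_nil]
  simp
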